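-- pv_equiv track=rewrite | github.com/snaptoolkit/snapctx | src/snapctx/api/_cross_package.py | _candidate_qnames
-- ===== SOURCE A (Python) =====
-- def _candidate_qnames(in_pkg_module: str, chain: list[str]) -> list[str]:
--     """Generate qname shapes to try for a (module, dotted-name-chain) target.
--
--     The qname grammar is ``<module>:<member.path>``; given a chain of N
--     parts, we don't statically know which prefix is part of the module
--     path vs the member path. Enumerate progressively: at split index
--     ``i``, parts ``[:i]`` extend the module and parts ``[i:]`` form the
--     member. The caller checks each candidate against the package's
--     symbols table.
--     """
--     if not chain:
--         # Imported the package or module itself with no further access.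
--         return [f"{in_pkg_module}:"] if in_pkg_module else [":"]
--     out: list[str] = []
--     for i in range(len(chain)):
--         mod_extra = ".".join(chain[:i])
--         member = ".".join(chain[i:])
--         if mod_extra:
--             mod = f"{in_pkg_module}.{mod_extra}" if in_pkg_module else mod_extra
--         else:
--             mod = in_pkg_module
--         out.append(f"{mod}:{member}")
--     return out
-- ===== SOURCE B (Python) =====
-- def _candidate_qnames(in_pkg_module: str, chain: list[str]) -> list[str]:
--     """Join the chain once, then produce each candidate by slicing the joined
--     string at successive dot positions instead of re-joining both halves per index."""
--     if not chain:
--         return [f"{in_pkg_module}:"] if in_pkg_module else [":"]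
--     full = ".".join(chain)
--     return [f"{in_pkg_module}:{full}"] + _tail_candidates(in_pkg_module, full, len(chain[0]), chain[1:])
--
--
-- def _tail_candidates(base: str, full: str, pos: int, rest: list[str]) -> list[str]:
--     if not rest:
--         return []
--     mod_extra = full[:pos]
--     member = full[pos + 1:]
--     if mod_extra:
--         mod = f"{base}.{mod_extra}" if base else mod_extra
--     else:
--         mod = base
--     return [f"{mod}:{member}"] + _tail_candidates(base, full, pos + 1 + len(rest[0]), rest[1:])
-- ===== Notes on version B (the rewrite author's own statement) =====
-- stated objective: alternative
-- what changed: B joins the chain into one dotted string once and produces every candidate by slicing that string at successive dot positions (tracked incrementally by a recursive helper), instead of re-slicing the chain and re-joining both halves at every split index.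
import Mathlib
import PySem

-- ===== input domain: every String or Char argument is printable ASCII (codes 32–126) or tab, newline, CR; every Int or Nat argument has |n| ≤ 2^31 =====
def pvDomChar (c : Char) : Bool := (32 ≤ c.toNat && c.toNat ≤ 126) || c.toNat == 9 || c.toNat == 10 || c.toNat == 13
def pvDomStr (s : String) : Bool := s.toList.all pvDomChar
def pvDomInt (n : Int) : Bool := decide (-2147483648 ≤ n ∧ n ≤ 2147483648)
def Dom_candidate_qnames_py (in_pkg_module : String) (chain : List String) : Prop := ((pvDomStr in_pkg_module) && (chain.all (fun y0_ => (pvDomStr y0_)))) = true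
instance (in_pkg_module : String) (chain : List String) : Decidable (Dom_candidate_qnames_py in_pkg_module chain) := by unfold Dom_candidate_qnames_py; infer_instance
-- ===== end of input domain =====

-- B joins the chain once and slices the joined string at successive dot positions,
-- instead of re-joining both halves of the chain at every split index (objective: alternative decomposition).

-- ===== PORT A =====
-- literal transliteration of A: for each i in range(len(chain)), re-join chain[:i] and chain[i:]
def candidate_qnames_py (in_pkg_module : String) (chain : List String) : List String :=
  if chain = [] then
    (if in_pkg_module ≠ "" then [in_pkg_module ++ ":"] else [":"])
  else
    (PySem.List.pyRange 0 (chain.length : Int) 1).foldl (fun out i =>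
      let mod_extra := PySem.Str.join "." (PySem.List.slice chain none (some i))
      let member := PySem.Str.join "." (PySem.List.slice chain (some i) none)
      let mod := if mod_extra ≠ "" then
          (if in_pkg_module ≠ "" then in_pkg_module ++ "." ++ mod_extra else mod_extra)
        else in_pkg_module
      out ++ [mod ++ ":" ++ member]) []

-- ===== PORT B =====
-- literal transliteration of B's helper _tail_candidates: slice the precomputed joined string
def pvTailCandidates (base full : String) (pos : Int) (rest : List String) : List String :=
  match rest with
  | [] => []
  | r :: rs =>
    let mod_extra := PySem.Str.slice full none (some pos)
    let member := PySem.Str.slice full (some (pos + 1)) none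
    let mod := if mod_extra ≠ "" then
        (if base ≠ "" then base ++ "." ++ mod_extra else mod_extra)
      else base
    (mod ++ ":" ++ member) :: pvTailCandidates base full (pos + 1 + PySem.Str.len r) rs

def candidate_qnames_py_alt (in_pkg_module : String) (chain : List String) : List String :=
  match chain with
  | [] => (if in_pkg_module ≠ "" then [in_pkg_module ++ ":"] else [":"])
  | c0 :: rest =>
    let full := PySem.Str.join "." chain
    (in_pkg_module ++ ":" ++ full) :: pvTailCandidates in_pkg_module full (PySem.Str.len c0) rest

-- ===== PRECONDITION & SPEC =====
def Spec_candidate_qnames_py (in_pkg_module : String) (chain : List String) (out : List String) : Prop := out = candidate_qnames_py_alt in_pkg_module chain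
instance (in_pkg_module : String) (chain : List String) (out : List String) : Decidable (Spec_candidate_qnames_py in_pkg_module chain out) := by unfold Spec_candidate_qnames_py; infer_instance

-- ===== CLAIM (what is proved, stated in full; the proofs are below) =====
def Claim_equal_candidate_qnames_py : Prop := ∀ (in_pkg_module : String) (chain : List String), Dom_candidate_qnames_py in_pkg_module chain → Spec_candidate_qnames_py in_pkg_module chain (candidate_qnames_py in_pkg_module chain)

-- ===== LEMMAS AND PROOFS =====

theorem pv_strings_ext (s t : String) (h : s.toList = t.toList) : s = t := by
  have := congrArg String.ofList h
  simpa using this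

-- join over a split chain, both halves nonempty
theorem pv_join_append (sep : List Char) (l1 l2 : List (List Char)) (h1 : l1 ≠ []) (h2 : l2 ≠ []) :
    PySem.Chars.join sep (l1 ++ l2) = PySem.Chars.join sep l1 ++ sep ++ PySem.Chars.join sep l2 := by
  induction l1 with
  | nil => exact absurd rfl h1
  | cons a l1' ih =>
    cases l1' with
    | nil =>
      cases l2 with
      | nil => exact absurd rfl h2
      | cons b l2' =>
        simp [PySem.Chars.join_cons_cons, PySem.Chars.join_singleton]
    | cons a2 l1'' =>
      have ih' := ih (by simp)
      simp only [List.cons_append] at ih'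
      have e1 : (a :: a2 :: l1'') ++ l2 = a :: a2 :: (l1'' ++ l2) := by simp
      rw [e1, PySem.Chars.join_cons_cons, ih', PySem.Chars.join_cons_cons]
      simp [List.append_assoc]

-- A's accumulator loop is a map
theorem pv_foldl_app {α β : Type} (f : α → β) (l : List α) (init : List β) :
    l.foldl (fun out i => out ++ [f i]) init = init ++ l.map f := by
  induction l generalizing init with
  | nil => simp
  | cons a l ih => simp [ih]

-- the element A emits at split index k
def pvElem (m : String) (chain : List String) (k : Nat) : String :=
  let mod_extra := PySem.Str.join "." (chain.take k)
  let member := PySem.Str.join "." (chain.drop k)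
  let mod := if mod_extra ≠ "" then
      (if m ≠ "" then m ++ "." ++ mod_extra else mod_extra)
    else m
  mod ++ ":" ++ member

-- slicing the full join at the boundary after `pre` recovers both joins
theorem pv_slice_take (pre rest : List String) (h1 : pre ≠ []) (h2 : rest ≠ []) :
    PySem.Str.slice (PySem.Str.join "." (pre ++ rest)) none
      (some ((PySem.Chars.join ['.'] (pre.map String.toList)).length : Int))
      = PySem.Str.join "." pre := by
  apply pv_strings_ext
  rw [PySem.Str.toList_slice]
  simp only [PySem.Chars.slice_eq_listSlice, PySem.List.slice_to_natCast]
  rw [PySem.Str.toList_join, PySem.Str.toList_join, List.map_append]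
  have hdot : String.toList "." = ['.'] := by simp
  rw [hdot, pv_join_append _ _ _ (by simpa using h1) (by simpa using h2)]
  rw [List.append_assoc, List.take_left]

theorem pv_slice_drop (pre rest : List String) (h1 : pre ≠ []) (h2 : rest ≠ []) :
    PySem.Str.slice (PySem.Str.join "." (pre ++ rest))
      (some (((PySem.Chars.join ['.'] (pre.map String.toList)).length : Int) + 1)) none
      = PySem.Str.join "." rest := by
  apply pv_strings_ext
  rw [PySem.Str.toList_slice]
  have hcast : (((PySem.Chars.join ['.'] (pre.map String.toList)).length : Int) + 1)
      = (((PySem.Chars.join ['.'] (pre.map String.toList)).length + 1 : Nat) : Int) := by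
    push_cast; ring
  rw [hcast]
  simp only [PySem.Chars.slice_eq_listSlice, PySem.List.slice_from_natCast]
  rw [PySem.Str.toList_join, PySem.Str.toList_join, List.map_append]
  have hdot : String.toList "." = ['.'] := by simp
  rw [hdot, pv_join_append _ _ _ (by simpa using h1) (by simpa using h2)]
  have hgrp : PySem.Chars.join ['.'] (pre.map String.toList) ++ ['.']
        ++ PySem.Chars.join ['.'] (rest.map String.toList)
      = (PySem.Chars.join ['.'] (pre.map String.toList) ++ ['.'])
        ++ PySem.Chars.join ['.'] (rest.map String.toList) := by
    rw [List.append_assoc]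
  rw [hgrp]
  have hlen : (PySem.Chars.join ['.'] (pre.map String.toList)).length + 1
      = (PySem.Chars.join ['.'] (pre.map String.toList) ++ ['.']).length := by simp
  rw [hlen, List.drop_left]

-- B's tail recursion produces exactly A's elements at indices pre.length, pre.length+1, …
theorem pv_tail_spec (m : String) (rest : List String) : ∀ (pre : List String), pre ≠ [] →
    pvTailCandidates m (PySem.Str.join "." (pre ++ rest))
      ((PySem.Chars.join ['.'] (pre.map String.toList)).length : Int) rest
      = (List.range rest.length).map (fun k => pvElem m (pre ++ rest) (pre.length + k)) := by
  induction rest with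
  | nil => intro pre _; simp [pvTailCandidates]
  | cons r rs ih =>
    intro pre hpre
    rw [pvTailCandidates]
    have hr : (r :: rs : List String) ≠ [] := by simp
    rw [pv_slice_take pre (r :: rs) hpre hr, pv_slice_drop pre (r :: rs) hpre hr]
    have hpos : ((PySem.Chars.join ['.'] (pre.map String.toList)).length : Int) + 1 + PySem.Str.len r
        = ((PySem.Chars.join ['.'] ((pre ++ [r]).map String.toList)).length : Int) := by
      rw [List.map_append, pv_join_append _ _ _ (by simpa using hpre) (by simp)]
      simp only [List.map_cons, List.map_nil, PySem.Chars.join_singleton]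
      rw [PySem.Str.len_eq]
      simp only [List.length_append, List.length_cons, List.length_nil]
      push_cast; ring
    have hchain : pre ++ r :: rs = (pre ++ [r]) ++ rs := by simp
    rw [hpos, hchain, ih (pre ++ [r]) (by simp)]
    have hhead : pvElem m ((pre ++ [r]) ++ rs) pre.length
        = (let mod_extra := PySem.Str.join "." pre
           let mod := if mod_extra ≠ "" then
               (if m ≠ "" then m ++ "." ++ mod_extra else mod_extra)
             else m
           mod ++ ":" ++ PySem.Str.join "." (r :: rs)) := by
      simp only [pvElem]
      rw [List.append_assoc, List.take_left, List.drop_left]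
      simp only [List.singleton_append]
    rw [List.length_cons, List.range_succ_eq_map]
    simp only [List.map_cons, List.map_map]
    refine List.cons_eq_cons.mpr ⟨?_, ?_⟩
    · exact hhead.symm
    · apply List.map_congr_left
      intro k _
      simp only [Function.comp]
      refine congrArg₂ (pvElem m) ?_ ?_
      · simp
      · simp only [List.length_append, List.length_cons, List.length_nil]
        omega

-- A's output as a map of pvElem
theorem pv_A_eq_map (m : String) (chain : List String) (h : chain ≠ []) :
    candidate_qnames_py m chain = (List.range chain.length).map (pvElem m chain) := by
  rw [candidate_qnames_py, if_neg h, PySem.List.pyRange_one, List.foldl_map, pv_foldl_app]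
  simp only [List.nil_append]
  have h0 : (((chain.length : Int)) - 0).toNat = chain.length := by omega
  rw [h0]
  apply List.map_congr_left
  intro k hk
  have e : (0 : Int) + (k : Int) = ((k : Nat) : Int) := by simp
  rw [e, PySem.List.slice_to_natCast, PySem.List.slice_from_natCast]
  rfl

-- ===== VERDICT (by name: the statement is the Claim_ definition above) =====
theorem candidate_qnames_py_spec : Claim_equal_candidate_qnames_py := by
  intro m chain _
  unfold Spec_candidate_qnames_py
  cases chain with
  | nil => rfl
  | cons c0 rest =>
    rw [pv_A_eq_map m (c0 :: rest) (by simp), candidate_qnames_py_alt]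
    simp only [List.length_cons, List.range_succ_eq_map, List.map_cons, List.map_map]
    refine List.cons_eq_cons.mpr ⟨?_, ?_⟩
    · -- head: split index 0
      have h0 : PySem.Str.join "." ([] : List String) = "" := by
        apply pv_strings_ext
        rw [PySem.Str.toList_join]
        simp [PySem.Chars.join_nil]
      simp [pvElem, h0]
    · have hlen : PySem.Str.len c0
          = ((PySem.Chars.join ['.'] ([c0].map String.toList)).length : Int) := by
        simp [PySem.Str.len_eq, PySem.Chars.join_singleton]
      have hfull : (c0 :: rest : List String) = [c0] ++ rest := by simp
      calc List.map (pvElem m (c0 :: rest) ∘ Nat.succ) (List.range rest.length)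
          = List.map (fun k => pvElem m ([c0] ++ rest) ([c0].length + k))
              (List.range rest.length) := by
            apply List.map_congr_left
            intro k _
            simp only [Function.comp, List.singleton_append, List.length_cons, List.length_nil]
            refine congrArg₂ (pvElem m) rfl ?_
            omega
        _ = pvTailCandidates m (PySem.Str.join "." ([c0] ++ rest))
              ((PySem.Chars.join ['.'] ([c0].map String.toList)).length : Int) rest :=
            (pv_tail_spec m rest [c0] (by simp)).symm
        _ = pvTailCandidates m (PySem.Str.join "." (c0 :: rest)) (PySem.Str.len c0) rest := by
            rw [hlen, hfull]
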